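-- pv_equiv track=rewrite | github.com/hansluebken/nx2gitweb | app/ui/code_viewer.py | format_operator
-- ===== SOURCE A (Python) =====
-- def format_operator(code: str, op: str, exclude_double: bool = False) -> str:
--     """Add spaces around an operator, respecting strings"""
--     result = []
--     in_string = False
--     string_char = None
--     i = 0
--
--     while i < len(code):
--         char = code[i]
--
--         # Track string state
--         if char in '"\'':
--             if not in_string:
--                 in_string = True
--                 string_char = char
--             elif char == string_char and (i == 0 or code[i-1] != '\\'):
--                 in_string = False
--                 string_char = None
--
--         # Check for operator
--         if not in_string and code[i:i+len(op)] == op: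
--             # Check for double operator (++, --)
--             if exclude_double and i + len(op) < len(code) and code[i + len(op)] == op[0]:
--                 result.append(char)
--                 i += 1
--                 continue
--
--             # Check if already has space before
--             if result and result[-1] not in ' \t\n(':
--                 result.append(' ')
--
--             result.append(op)
--             i += len(op)
--
--             # Check if already has space after
--             if i < len(code) and code[i] not in ' \t\n)':
--                 result.append(' ')
--             continue
--
--         result.append(char)
--         i += 1
--
--     return ''.join(result)
-- ===== SOURCE B (Python) =====
-- def format_operator(code: str, op: str, exclude_double: bool = False) -> str:
--     """Add spaces around an operator, respecting strings.
--
--     Two-pass, stateful-tail-free rewrite: pass 1 precomputes a per-index in-string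
--     mask; pass 2 rewrites forward, tracking the last emitted piece in `prev`
--     instead of inspecting the output buffer's tail.
--     """
--     n = len(code)
--     # Pass 1: in-string mask, recording the state AFTER the toggle at each index.
--     in_str = []
--     in_string = False
--     string_char = None
--     for i, ch in enumerate(code):
--         if ch in '"\'':
--             if not in_string:
--                 in_string, string_char = True, ch
--             elif ch == string_char and (i == 0 or code[i - 1] != '\\'):
--                 in_string, string_char = False, None
--         in_str.append(in_string)
--     # Pass 2: mask-driven rewrite with an explicit last-piece register.
--     m = len(op)
--     out = []
--     prev = ''
--     i = 0
--     while i < n: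
--         if not in_str[i] and code[i:i + m] == op:
--             if exclude_double and i + m < n and code[i + m] == op[0]:
--                 out.append(code[i])
--                 prev = code[i]
--                 i += 1
--                 continue
--             if prev and prev not in ' \t\n(':
--                 out.append(' ')
--             out.append(op)
--             i += m
--             if i < n and code[i] not in ' \t\n)':
--                 out.append(' ')
--                 prev = ' '
--             else:
--                 prev = op
--         else:
--             out.append(code[i])
--             prev = code[i]
--             i += 1
--     return ''.join(out)
-- ===== Notes on version B (the rewrite author's own statement) =====
-- stated objective: alternative
-- what changed: A rewrites in one fused loop that threads the live in-string state and decides the space-before by inspecting the output buffer's tail; B first precomputes a per-index in-string mask in a separate pass and then rewrites forward with an explicit last-emitted-piece register, never reading the output buffer.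
-- outside the precondition, e.g. on format_operator("+'++'", "+'", False): A returns "+' + +'", B returns "+' ++'"; on format_operator('"ab', '', False): A returns '"ab', B returns '"ab'
import Mathlib
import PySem

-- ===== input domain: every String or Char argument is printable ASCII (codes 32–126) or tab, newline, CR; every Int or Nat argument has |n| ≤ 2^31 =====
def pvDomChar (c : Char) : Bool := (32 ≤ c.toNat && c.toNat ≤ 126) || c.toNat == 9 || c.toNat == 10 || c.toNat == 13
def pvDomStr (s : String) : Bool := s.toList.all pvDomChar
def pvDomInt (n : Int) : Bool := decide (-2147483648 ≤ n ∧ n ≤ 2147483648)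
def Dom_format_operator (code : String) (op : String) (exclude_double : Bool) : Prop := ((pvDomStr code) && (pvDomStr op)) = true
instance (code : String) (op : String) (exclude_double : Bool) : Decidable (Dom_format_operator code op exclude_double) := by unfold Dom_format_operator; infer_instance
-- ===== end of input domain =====

-- B replaces A's fused loop (live string state + output-tail inspection) by two passes: a precomputed
-- per-index string mask, then a forward rewrite carrying the last emitted piece in a register;
-- objective: alternative decomposition.

-- ===== PORT A =====
-- A's "track string state" lines: if char in '"\'': if not in_string: open;
-- elif char == string_char and (i == 0 or code[i-1] != '\\'): close
def pvAToggle (code : List Char) (i : Nat) (s : Bool × Option Char) : Bool × Option Char :=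
  let char := code.getD i ' '
  if char = '"' ∨ char = '\'' then
    if !s.1 then (true, some char)
    else if some char = s.2 ∧ (i = 0 ∨ code.getD (i - 1) ' ' ≠ '\\') then (false, none)
    else s
  else s

-- A's while loop; result is the list of appended pieces, newest first (joined reversed at the end).
-- code[i:i+len(op)] is ported as (code.drop i).take op.length, exact for the nonnegative i used here;
-- `result[-1] not in ' \t\n('` is Python substring membership of the piece: PySem.Chars.isIn.
def pvA_loop (code op : List Char) (ed : Bool) : Nat → Nat → Bool × Option Char → List (List Char) → List (List Char)
  | 0, _, _, result => result          -- fuel guard only; never reached for the fuel supplied below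
  | fuel + 1, i, s, result =>
    if i < code.length then
      let char := code.getD i ' '
      let s2 := pvAToggle code i s
      if !s2.1 ∧ (code.drop i).take op.length = op then
        if ed ∧ i + op.length < code.length ∧ code.getD (i + op.length) ' ' = op.headD ' ' then
          pvA_loop code op ed fuel (i + 1) s2 ([char] :: result)
        else
          let r1 := if result ≠ [] ∧ ¬ PySem.Chars.isIn (result.headD []) " \t\n(".toList then
                      [' '] :: result else result
          let r2 := op :: r1
          let i2 := i + op.length
          let r3 := if i2 < code.length ∧ code.getD i2 ' ' ∉ [' ', '\t', '\n', ')'] then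
                      [' '] :: r2 else r2
          pvA_loop code op ed fuel i2 s2 r3
      else
        pvA_loop code op ed fuel (i + 1) s2 ([char] :: result)
    else result

def format_operator (code : String) (op : String) (exclude_double : Bool) : String :=
  String.mk (pvA_loop code.toList op.toList exclude_double (code.toList.length + 1) 0 (false, none) []).reverse.flatten

-- ===== PORT B =====
-- pass 1: per-index in-string mask, state AFTER the toggle at each index (n = remaining chars);
-- B's toggle is written inline here (same Python lines as A's, shared textually in Source B too)
def pvB_mask (code : List Char) : Nat → Nat → Bool → Option Char → List Bool
  | 0, _, _, _ => []
  | n + 1, i, ins, sc =>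
    let ch := code.getD i ' '
    if ch = '"' ∨ ch = '\'' then
      if !ins then true :: pvB_mask code n (i + 1) true (some ch)
      else if some ch = sc ∧ (i = 0 ∨ code.getD (i - 1) ' ' ≠ '\\') then
        false :: pvB_mask code n (i + 1) false none
      else ins :: pvB_mask code n (i + 1) ins sc
    else ins :: pvB_mask code n (i + 1) ins sc

-- pass 2: forward rewrite, `prev` is the last emitted piece ('' at the start);
-- `prev and prev not in ' \t\n('` is Python substring membership: PySem.Chars.isIn
def pvB_go (code op : List Char) (mask : List Bool) (ed : Bool) : Nat → Nat → List Char → List Char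
  | 0, _, _ => []                      -- fuel guard only
  | fuel + 1, i, prev =>
    if i < code.length then
      if !mask.getD i false ∧ (code.drop i).take op.length = op then
        if ed ∧ i + op.length < code.length ∧ code.getD (i + op.length) ' ' = op.headD ' ' then
          code.getD i ' ' :: pvB_go code op mask ed fuel (i + 1) [code.getD i ' ']
        else
          let pre := if prev ≠ [] ∧ ¬ PySem.Chars.isIn prev " \t\n(".toList then [' '] else []
          let j := i + op.length
          if j < code.length ∧ code.getD j ' ' ∉ [' ', '\t', '\n', ')'] then
            pre ++ op ++ ' ' :: pvB_go code op mask ed fuel j [' ']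
          else
            pre ++ op ++ pvB_go code op mask ed fuel j op
      else
        code.getD i ' ' :: pvB_go code op mask ed fuel (i + 1) [code.getD i ' ']
    else []

def format_operator_alt (code : String) (op : String) (exclude_double : Bool) : String :=
  let cs := code.toList
  let mask := pvB_mask cs cs.length 0 false none
  String.mk (pvB_go cs op.toList mask exclude_double (cs.length + 1) 0 [])

-- ===== PRECONDITION & SPEC =====
-- Pre_ excludes the empty operator (A loops forever as soon as any index lies outside a string, and
-- raises IndexError with exclude_double) and operators containing a quote character (outside the
-- natural operator domain: A's string-state tracking skips quotes inside a matched operator, an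
-- accident of its fused loop).
def Pre_format_operator (code : String) (op : String) (exclude_double : Bool) : Prop :=
  op.toList ≠ [] ∧ '"' ∉ op.toList ∧ '\'' ∉ op.toList
instance (code : String) (op : String) (exclude_double : Bool) : Decidable (Pre_format_operator code op exclude_double) := by unfold Pre_format_operator; infer_instance

def pvWitness_format_operator : String × String × Bool := ("a=1+'x+y'", "+", false)

def Spec_format_operator (code : String) (op : String) (exclude_double : Bool) (out : String) : Prop := out = format_operator_alt code op exclude_double
instance (code : String) (op : String) (exclude_double : Bool) (out : String) : Decidable (Spec_format_operator code op exclude_double out) := by unfold Spec_format_operator; infer_instance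

-- ===== CLAIM (what is proved, stated in full; the proofs are below) =====
def Claim_equal_format_operator : Prop := ∀ (code : String) (op : String) (exclude_double : Bool), Dom_format_operator code op exclude_double → Pre_format_operator code op exclude_double → Spec_format_operator code op exclude_double (format_operator code op exclude_double)

-- ===== LEMMAS AND PROOFS =====

-- the in-string state after processing the first j characters (the state A carries at loop entry i = j)
def pvState (code : List Char) : Nat → Bool × Option Char
  | 0 => (false, none)
  | j + 1 => pvAToggle code j (pvState code j)

-- a non-quote character leaves the state unchanged
theorem pvToggle_id {code : List Char} {i : Nat} (s : Bool × Option Char)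
    (h : code.getD i ' ' ≠ '"') (h' : code.getD i ' ' ≠ '\'') :
    pvAToggle code i s = s := by
  have hnot : ¬(code.getD i ' ' = '"' ∨ code.getD i ' ' = '\'') := fun hc => hc.elim h h'
  unfold pvAToggle
  simp only [if_neg hnot]

-- B's inlined toggle agrees with A's pvAToggle at each step
theorem pvB_mask_step (code : List Char) (n i : Nat) (s : Bool × Option Char) :
    pvB_mask code (n + 1) i s.1 s.2 =
      (pvAToggle code i s).1 :: pvB_mask code n (i + 1) (pvAToggle code i s).1 (pvAToggle code i s).2 := by
  rcases s with ⟨ins, sc⟩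
  conv_lhs => rw [pvB_mask]
  unfold pvAToggle
  by_cases hq : code[i]?.getD ' ' = '"' ∨ code[i]?.getD ' ' = '\''
  · cases ins
    · simp [hq]
    · by_cases h2 : some (code[i]?.getD ' ') = sc ∧ (i = 0 ∨ ¬code[i - 1]?.getD ' ' = '\\')
      · simp [hq, h2]
      · simp [hq, h2]
  · simp [hq]

-- the mask records the post-toggle state at each index
theorem pvB_mask_getD (code : List Char) :
    ∀ (n i k : Nat), k < n →
      (pvB_mask code n i (pvState code i).1 (pvState code i).2).getD k false
        = (pvState code (i + k + 1)).1 := by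
  intro n
  induction n with
  | zero => intro i k hk; omega
  | succ n ih =>
    intro i k hk
    rw [pvB_mask_step]
    have h1 : pvAToggle code i (pvState code i) = pvState code (i + 1) := rfl
    cases k with
    | zero => simp [h1]
    | succ k =>
      have h2 := ih (i + 1) k (by omega)
      rw [h1, List.getD_cons_succ, h2]
      congr 2
      omega

-- across the matched operator (no quote characters) the state is unchanged
theorem pvState_run (code op : List Char) (hq : '"' ∉ op ∧ '\'' ∉ op)
    (m i : Nat) (hslice : (code.drop i).take m = op) (hm : m = op.length) :
    ∀ t, t ≤ m → 1 ≤ t → pvState code (i + t) = pvState code (i + 1) := by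
  have hlen : m ≤ code.length - i := by
    have hl := congrArg List.length hslice
    simp [Nat.min_def] at hl
    by_cases hc : m ≤ code.length - i
    · exact hc
    · rw [if_neg hc] at hl; omega
  intro t
  induction t with
  | zero => intro _ h; omega
  | succ t ih =>
    intro hle h1
    cases Nat.eq_or_lt_of_le h1 with
    | inl h => simp [← h]
    | inr h =>
      have ht1 : 1 ≤ t := by omega
      have htm : t < m := by omega
      have hil : i + t < code.length := by omega
      have hchar : code.getD (i + t) ' ' = op.getD t ' ' := by
        rw [← hslice]
        simp only [List.getD, List.getElem?_take, List.getElem?_drop]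
        rw [if_pos htm]
      have hop : op.getD t ' ' ∈ op := by
        have htlen : t < op.length := by omega
        rw [List.getD_eq_getElem op ' ' htlen]
        exact List.getElem_mem htlen
      have hnq1 : code.getD (i + t) ' ' ≠ '"' := by
        rw [hchar]; intro hc; exact hq.1 (hc ▸ hop)
      have hnq2 : code.getD (i + t) ' ' ≠ '\'' := by
        rw [hchar]; intro hc; exact hq.2 (hc ▸ hop)
      have hstep : pvState code (i + (t + 1)) = pvState code (i + t) := by
        show pvAToggle code (i + t) (pvState code (i + t)) = _
        exact pvToggle_id _ hnq1 hnq2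
      rw [hstep]
      exact ih (by omega) ht1

-- main simulation lemma: A's fused reversed-pieces loop, flattened, equals B's forward rewrite,
-- provided `prev` is the head piece of `result` and no piece is empty
theorem pvAB_loop (code op : List Char) (ed : Bool)
    (hop : op ≠ []) (hq : '"' ∉ op ∧ '\'' ∉ op) :
    ∀ (fuel i : Nat) (result : List (List Char)), [] ∉ result →
      (pvA_loop code op ed fuel i (pvState code i) result).reverse.flatten =
      result.reverse.flatten ++
        pvB_go code op (pvB_mask code code.length 0 false none) ed fuel i (result.headD []) := by
  intro fuel
  induction fuel with
  | zero => intro i result _; simp [pvA_loop, pvB_go]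
  | succ fuel ih =>
    intro i result hres
    simp only [pvA_loop, pvB_go]
    by_cases hi : i < code.length
    · simp only [if_pos hi]
      have hmask : (pvB_mask code code.length 0 false none).getD i false
          = (pvAToggle code i (pvState code i)).1 := by
        have := pvB_mask_getD code code.length 0 i hi
        simpa [pvState] using this
      rw [hmask]
      have h1 : pvAToggle code i (pvState code i) = pvState code (i + 1) := rfl
      by_cases hmatch : ((!(pvAToggle code i (pvState code i)).1 : Bool) = true) ∧ (code.drop i).take op.length = op
      · simp only [if_pos hmatch]
        by_cases hdbl : ed = true ∧ i + op.length < code.length ∧ code.getD (i + op.length) ' ' = op.headD ' '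
        · simp only [if_pos hdbl]
          rw [h1, ih (i + 1) ([code.getD i ' '] :: result) (by simp [hres])]
          simp
        · simp only [if_neg hdbl]
          have hrun : pvState code (i + op.length) = pvState code (i + 1) :=
            pvState_run code op hq op.length i hmatch.2 rfl op.length (le_refl _)
              (by cases op with | nil => exact absurd rfl hop | cons a l => simp)
          have hne : (result ≠ []) ↔ (result.headD [] ≠ []) := by
            cases result with
            | nil => simp
            | cons x r =>
              simp only [List.headD_cons, ne_eq, reduceCtorEq, not_false_eq_true, true_iff]
              intro hx; exact hres (by simp [hx])
          by_cases hpre : result ≠ [] ∧ ¬ PySem.Chars.isIn (result.headD []) " \t\n(".toList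
          · have hpre' : result.headD [] ≠ [] ∧ ¬ PySem.Chars.isIn (result.headD []) " \t\n(".toList :=
              ⟨hne.mp hpre.1, hpre.2⟩
            simp only [if_pos hpre, if_pos hpre']
            by_cases hsp : i + op.length < code.length ∧ code.getD (i + op.length) ' ' ∉ [' ', '\t', '\n', ')']
            · simp only [if_pos hsp]
              rw [h1, ← hrun,
                ih (i + op.length) ([' '] :: op :: [' '] :: result) (by simp [hres, hop])]
              simp
            · simp only [if_neg hsp]
              rw [h1, ← hrun, ih (i + op.length) (op :: [' '] :: result) (by simp [hres, hop])]
              simp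
          · have hpre' : ¬(result.headD [] ≠ [] ∧ ¬ PySem.Chars.isIn (result.headD []) " \t\n(".toList) := by
              intro hc; exact hpre ⟨hne.mpr hc.1, hc.2⟩
            simp only [if_neg hpre, if_neg hpre']
            by_cases hsp : i + op.length < code.length ∧ code.getD (i + op.length) ' ' ∉ [' ', '\t', '\n', ')']
            · simp only [if_pos hsp]
              rw [h1, ← hrun, ih (i + op.length) ([' '] :: op :: result) (by simp [hres, hop])]
              simp
            · simp only [if_neg hsp]
              rw [h1, ← hrun, ih (i + op.length) (op :: result) (by simp [hres, hop])]
              simp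
      · simp only [if_neg hmatch]
        rw [h1, ih (i + 1) ([code.getD i ' '] :: result) (by simp [hres])]
        simp
    · simp [if_neg hi]

-- ===== VERDICT (by name: the statement is the Claim_ definition above) =====
theorem format_operator_spec : Claim_equal_format_operator := by
  intro code op ed _hdom hpre
  show format_operator code op ed = format_operator_alt code op ed
  unfold format_operator format_operator_alt
  have h := pvAB_loop code.toList op.toList ed hpre.1 ⟨hpre.2.1, hpre.2.2⟩
    (code.toList.length + 1) 0 [] (by simp)
  exact congrArg String.mk (by simpa [pvState] using h)
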